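-- pv_equiv track=rewrite | github.com/Rupert-Hooper/Poker-Game | Poker Game/checker.py | CheckThreeOfaKind
-- ===== SOURCE A (Python) =====
-- def CheckThreeOfaKind(hand): #returns true if hand has a three of a kind
--     Trip = False
--     i=0
--     j=0
--     n=0
--     while i<len(hand) and Trip ==False:
--         j=0
--         while j<len(hand) and Trip ==False:
--             n=0
--             while n<len(hand) and Trip ==False:
--                 if hand[i][1] == hand[j][1] == hand[n][1] and i!=j and i!=n and j!=n:
--                     Trip=True
--                 n+=1
--             j+=1
--         i+=1
--     return Trip
-- ===== SOURCE B (Python) =====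
-- def CheckThreeOfaKind(hand):
--     # One pass with a rank-count dictionary: return True as soon as
--     # some rank is seen a third time.
--     counts = {}
--     for card in hand:
--         c = counts.get(card[1], 0) + 1
--         if c >= 3:
--             return True
--         counts[card[1]] = c
--     return False
-- ===== Notes on version B (the rewrite author's own statement) =====
-- stated objective: faster
-- what changed: Replaced the triple nested all-index scan with a single pass that maintains a rank-count dictionary and returns True at the third occurrence of any rank.
import Mathlib
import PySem

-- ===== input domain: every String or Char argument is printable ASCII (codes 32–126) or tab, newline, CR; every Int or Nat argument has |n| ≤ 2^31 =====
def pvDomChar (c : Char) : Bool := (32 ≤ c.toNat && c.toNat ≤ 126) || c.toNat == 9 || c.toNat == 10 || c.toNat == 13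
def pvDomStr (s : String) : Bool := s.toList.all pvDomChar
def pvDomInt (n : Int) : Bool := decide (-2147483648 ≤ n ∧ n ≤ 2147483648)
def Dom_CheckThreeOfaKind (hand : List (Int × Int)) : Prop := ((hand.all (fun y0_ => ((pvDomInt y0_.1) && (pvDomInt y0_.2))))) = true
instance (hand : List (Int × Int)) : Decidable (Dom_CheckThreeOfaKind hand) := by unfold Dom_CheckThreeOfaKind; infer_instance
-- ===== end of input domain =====

-- B replaces A's triple nested all-index scan by a single pass over the hand
-- maintaining a rank → count dictionary, returning True at the third occurrence
-- of any rank (objective: faster).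

-- ===== PORT A =====
-- literal transliteration: three nested while loops over indices, each exiting
-- once Trip is True (the 'if Trip then Trip else …' guard mirrors 'and Trip == False')
def CheckThreeOfaKind (hand : List (Int × Int)) : Bool :=
  (PySem.List.pyRange 0 (PySem.List.len hand) 1).foldl (fun Trip i =>
    if Trip then Trip else
    (PySem.List.pyRange 0 (PySem.List.len hand) 1).foldl (fun Trip j =>
      if Trip then Trip else
      (PySem.List.pyRange 0 (PySem.List.len hand) 1).foldl (fun Trip n =>
        if Trip then Trip else
        if decide ((PySem.List.pyGetD hand i (0, 0)).2 = (PySem.List.pyGetD hand j (0, 0)).2 ∧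
                   (PySem.List.pyGetD hand j (0, 0)).2 = (PySem.List.pyGetD hand n (0, 0)).2 ∧
                   i ≠ j ∧ i ≠ n ∧ j ≠ n)
        then true else Trip) Trip) Trip) false

-- ===== PORT B =====
-- one pass; counts[rank] is the number of occurrences among the cards already seen
def pvAltLoop (counts : PySem.Dict Int Int) : List (Int × Int) → Bool
  | [] => false
  | card :: rest =>
    let c := counts.getD card.2 0 + 1
    if 3 ≤ c then true else pvAltLoop (counts.insert card.2 c) rest

def CheckThreeOfaKind_alt (hand : List (Int × Int)) : Bool :=
  pvAltLoop PySem.Dict.empty hand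

-- ===== PRECONDITION & SPEC =====
def Spec_CheckThreeOfaKind (hand : List (Int × Int)) (out : Bool) : Prop := out = CheckThreeOfaKind_alt hand
instance (hand : List (Int × Int)) (out : Bool) : Decidable (Spec_CheckThreeOfaKind hand out) := by unfold Spec_CheckThreeOfaKind; infer_instance

-- ===== CLAIM (what is proved, stated in full; the proofs are below) =====
def Claim_equal_CheckThreeOfaKind : Prop := ∀ (hand : List (Int × Int)), Dom_CheckThreeOfaKind hand → Spec_CheckThreeOfaKind hand (CheckThreeOfaKind hand)


-- ===== LEMMAS AND PROOFS =====

-- a 'while … and Trip == False' loop is an any-fold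
theorem pv_foldl_or {α : Type} (p : α → Bool) (l : List α) (b : Bool) :
    l.foldl (fun ok x => ok || p x) b = (b || l.any p) := by
  induction l generalizing b with
  | nil => simp
  | cons x t ih => simp [ih, Bool.or_assoc]

theorem pv_foldl_guard {α : Type} (p : α → Bool) (l : List α) (b : Bool) :
    l.foldl (fun ok x => if ok then ok else if p x then true else ok) b = (b || l.any p) := by
  have hb : (fun (ok : Bool) x => if ok then ok else if p x then true else ok)
      = (fun ok x => ok || p x) := by
    funext ok x; cases ok <;> cases hp : p x <;> simp
  rw [hb, pv_foldl_or]

-- A's three nested early-exit loops are a triple 'any'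
theorem pv_tri_any (R : List Int) (q : Int → Int → Int → Bool) :
    R.foldl (fun T i => if T then T else
      R.foldl (fun T j => if T then T else
        R.foldl (fun T n => if T then T else if q i j n then true else T) T) T) false
    = R.any (fun i => R.any (fun j => R.any (q i j))) := by
  have hmid : ∀ (i : Int) (T : Bool),
      R.foldl (fun T j => if T then T else
        R.foldl (fun T n => if T then T else if q i j n then true else T) T) T
      = (T || R.any (fun j => R.any (q i j))) := by
    intro i T
    have hb : (fun (T : Bool) j => if T then T else
        R.foldl (fun T n => if T then T else if q i j n then true else T) T)
        = (fun T j => if T then T else if R.any (q i j) then true else T) := by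
      funext T j
      cases T
      · rw [pv_foldl_guard]; cases hA : R.any (q i j) <;> simp
      · simp
    rw [hb, pv_foldl_guard]
  have hout : (fun (T : Bool) i => if T then T else
      R.foldl (fun T j => if T then T else
        R.foldl (fun T n => if T then T else if q i j n then true else T) T) T)
      = (fun T i => if T then T else if (R.any fun j => R.any (q i j)) then true else T) := by
    funext T i
    cases T
    · rw [hmid]; cases hA : (R.any fun j => R.any (q i j)) <;> simp
    · simp
  rw [hout, pv_foldl_guard, Bool.false_or]

theorem pv_count_cons (x k : Int) (t : List Int) :
    (x :: t).count k = t.count k + (if x = k then 1 else 0) := by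
  simp [List.count_cons]

-- count ⇒ indices
theorem pv_cnt1 (r : List Int) (k : Int) (h : 1 ≤ r.count k) :
    ∃ a, a < r.length ∧ r.getD a 0 = k := by
  induction r with
  | nil => simp at h
  | cons x t ih =>
    rw [pv_count_cons] at h
    by_cases hx : x = k
    · exact ⟨0, by simp, by simpa using hx⟩
    · rw [if_neg hx] at h
      obtain ⟨a, ha, hv⟩ := ih (by omega)
      exact ⟨a + 1, by simpa using ha, by simpa using hv⟩

theorem pv_cnt2 (r : List Int) (k : Int) (h : 2 ≤ r.count k) :
    ∃ a b, a < b ∧ b < r.length ∧ r.getD a 0 = k ∧ r.getD b 0 = k := by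
  induction r with
  | nil => simp at h
  | cons x t ih =>
    rw [pv_count_cons] at h
    by_cases hx : x = k
    · rw [if_pos hx] at h
      obtain ⟨a, ha, hv⟩ := pv_cnt1 t k (by omega)
      exact ⟨0, a + 1, by omega, by simpa using ha, by simpa using hx, by simpa using hv⟩
    · rw [if_neg hx] at h
      obtain ⟨a, b, hab, hb, hva, hvb⟩ := ih (by omega)
      exact ⟨a + 1, b + 1, by omega, by simpa using hb, by simpa using hva, by simpa using hvb⟩

theorem pv_cnt3 (r : List Int) (k : Int) (h : 3 ≤ r.count k) :
    ∃ a b c, a < b ∧ b < c ∧ c < r.length ∧ r.getD a 0 = k ∧ r.getD b 0 = k ∧ r.getD c 0 = k := by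
  induction r with
  | nil => simp at h
  | cons x t ih =>
    rw [pv_count_cons] at h
    by_cases hx : x = k
    · rw [if_pos hx] at h
      obtain ⟨a, b, hab, hb, hva, hvb⟩ := pv_cnt2 t k (by omega)
      exact ⟨0, a + 1, b + 1, by omega, by omega, by simpa using hb, by simpa using hx,
        by simpa using hva, by simpa using hvb⟩
    · rw [if_neg hx] at h
      obtain ⟨a, b, c, hab, hbc, hc, hva, hvb, hvc⟩ := ih (by omega)
      exact ⟨a + 1, b + 1, c + 1, by omega, by omega, by simpa using hc,
        by simpa using hva, by simpa using hvb, by simpa using hvc⟩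

-- indices ⇒ count
theorem pv_cntOf1 (r : List Int) (k : Int) (a : Nat) (ha : a < r.length) (hv : r.getD a 0 = k) :
    1 ≤ r.count k := by
  induction r generalizing a with
  | nil => simp at ha
  | cons x t ih =>
    rw [pv_count_cons]
    cases a with
    | zero => simp at hv; rw [if_pos hv]; omega
    | succ a' =>
      have := ih a' (by simpa using ha) (by simpa using hv)
      split_ifs <;> omega

theorem pv_cntOf2 (r : List Int) (k : Int) (a b : Nat) (hab : a < b) (hb : b < r.length)
    (hva : r.getD a 0 = k) (hvb : r.getD b 0 = k) : 2 ≤ r.count k := by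
  induction r generalizing a b with
  | nil => simp at hb
  | cons x t ih =>
    rw [pv_count_cons]
    obtain ⟨b', rfl⟩ : ∃ b', b = b' + 1 := ⟨b - 1, by omega⟩
    cases a with
    | zero =>
      simp at hva
      have := pv_cntOf1 t k b' (by simpa using hb) (by simpa using hvb)
      rw [if_pos hva]; omega
    | succ a' =>
      have := ih a' b' (by omega) (by simpa using hb) (by simpa using hva) (by simpa using hvb)
      split_ifs <;> omega

theorem pv_cntOf3 (r : List Int) (k : Int) (a b c : Nat) (hab : a < b) (hbc : b < c)
    (hc : c < r.length) (hva : r.getD a 0 = k) (hvb : r.getD b 0 = k) (hvc : r.getD c 0 = k) :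
    3 ≤ r.count k := by
  induction r generalizing a b c with
  | nil => simp at hc
  | cons x t ih =>
    rw [pv_count_cons]
    obtain ⟨b', rfl⟩ : ∃ b', b = b' + 1 := ⟨b - 1, by omega⟩
    obtain ⟨c', rfl⟩ : ∃ c', c = c' + 1 := ⟨c - 1, by omega⟩
    cases a with
    | zero =>
      simp at hva
      have := pv_cntOf2 t k b' c' (by omega) (by simpa using hc)
        (by simpa using hvb) (by simpa using hvc)
      rw [if_pos hva]; omega
    | succ a' =>
      have := ih a' b' c' (by omega) (by omega) (by simpa using hc)
        (by simpa using hva) (by simpa using hvb) (by simpa using hvc)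
      split_ifs <;> omega

-- three pairwise-distinct (unordered) indices with one common value give count ≥ 3
theorem pv_cntOf3' (r : List Int) (k : Int) (a b c : Nat)
    (ha : a < r.length) (hb : b < r.length) (hc : c < r.length)
    (hab : a ≠ b) (hac : a ≠ c) (hbc : b ≠ c)
    (hva : r.getD a 0 = k) (hvb : r.getD b 0 = k) (hvc : r.getD c 0 = k) :
    3 ≤ r.count k := by
  rcases Nat.lt_trichotomy a b with h1 | h1 | h1
  · rcases Nat.lt_trichotomy b c with h2 | h2 | h2
    · exact pv_cntOf3 r k a b c h1 h2 hc hva hvb hvc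
    · omega
    · rcases Nat.lt_trichotomy a c with h3 | h3 | h3
      · exact pv_cntOf3 r k a c b h3 h2 hb hva hvc hvb
      · omega
      · exact pv_cntOf3 r k c a b h3 h1 hb hvc hva hvb
  · omega
  · rcases Nat.lt_trichotomy a c with h2 | h2 | h2
    · exact pv_cntOf3 r k b a c h1 h2 hc hvb hva hvc
    · omega
    · rcases Nat.lt_trichotomy b c with h3 | h3 | h3
      · exact pv_cntOf3 r k b c a h3 h2 ha hvb hvc hva
      · omega
      · exact pv_cntOf3 r k c b a h3 h1 ha hvc hvb hva

theorem pv_snd_getD (hand : List (Int × Int)) (a : Nat) (ha : a < hand.length) :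
    (hand.map Prod.snd).getD a 0 = (hand.getD a (0, 0)).2 := by
  induction hand generalizing a with
  | nil => simp at ha
  | cons x t ih =>
    cases a with
    | zero => simp
    | succ a' => simpa using ih a' (by simpa using ha)

-- characterisation of A: some rank occurs three times
theorem pv_A_iff (hand : List (Int × Int)) :
    CheckThreeOfaKind hand = true ↔ ∃ k, 3 ≤ ((hand.map Prod.snd).count k) := by
  have h1 : CheckThreeOfaKind hand
      = (PySem.List.pyRange 0 (PySem.List.len hand) 1).any (fun i =>
        (PySem.List.pyRange 0 (PySem.List.len hand) 1).any (fun j =>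
        (PySem.List.pyRange 0 (PySem.List.len hand) 1).any (fun n =>
          decide ((PySem.List.pyGetD hand i (0, 0)).2 = (PySem.List.pyGetD hand j (0, 0)).2 ∧
                  (PySem.List.pyGetD hand j (0, 0)).2 = (PySem.List.pyGetD hand n (0, 0)).2 ∧
                  i ≠ j ∧ i ≠ n ∧ j ≠ n)))) :=
    pv_tri_any (PySem.List.pyRange 0 (PySem.List.len hand) 1)
      (fun i j n => decide ((PySem.List.pyGetD hand i (0, 0)).2 = (PySem.List.pyGetD hand j (0, 0)).2 ∧
                  (PySem.List.pyGetD hand j (0, 0)).2 = (PySem.List.pyGetD hand n (0, 0)).2 ∧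
                  i ≠ j ∧ i ≠ n ∧ j ≠ n))
  rw [h1]
  simp only [List.any_eq_true, PySem.List.mem_pyRange_one, PySem.List.len_eq,
    decide_eq_true_eq]
  constructor
  · rintro ⟨i, ⟨hi0, hiL⟩, j, ⟨hj0, hjL⟩, n, ⟨hn0, hnL⟩, hv1, hv2, hij, hin, hjn⟩
    obtain ⟨a, rfl⟩ : ∃ a : Nat, i = (a : Int) := ⟨i.toNat, by omega⟩
    obtain ⟨b, rfl⟩ : ∃ b : Nat, j = (b : Int) := ⟨j.toNat, by omega⟩
    obtain ⟨c, rfl⟩ : ∃ c : Nat, n = (c : Int) := ⟨n.toNat, by omega⟩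
    simp only [PySem.List.pyGetD_natCast] at hv1 hv2
    have ha : a < hand.length := by omega
    have hb : b < hand.length := by omega
    have hc : c < hand.length := by omega
    refine ⟨(hand.getD a (0, 0)).2, pv_cntOf3' _ _ a b c (by simpa using ha) (by simpa using hb)
      (by simpa using hc) (by omega) (by omega) (by omega)
      (pv_snd_getD hand a ha) ?_ ?_⟩
    · rw [pv_snd_getD hand b hb]; exact hv1.symm
    · rw [pv_snd_getD hand c hc]; omega
  · rintro ⟨k, hk⟩
    obtain ⟨a, b, c, hab, hbc, hc, hva, hvb, hvc⟩ := pv_cnt3 _ k hk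
    have hc' : c < hand.length := by simpa using hc
    have ha' : a < hand.length := by omega
    have hb' : b < hand.length := by omega
    refine ⟨(a : Int), ⟨by omega, by omega⟩, (b : Int), ⟨by omega, by omega⟩,
      (c : Int), ⟨by omega, by omega⟩, ?_, ?_, by omega, by omega, by omega⟩
    · simp only [PySem.List.pyGetD_natCast]
      rw [← pv_snd_getD hand a ha', ← pv_snd_getD hand b hb', hva, hvb]
    · simp only [PySem.List.pyGetD_natCast]
      rw [← pv_snd_getD hand b hb', ← pv_snd_getD hand c hc', hvb, hvc]

-- invariant of B's loop: the dictionary holds the occurrence counts of the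
-- processed prefix p, and no rank has been seen three times yet
theorem pv_altLoop_iff : ∀ (l : List (Int × Int)) (p : List Int) (d : PySem.Dict Int Int),
    (∀ k, d.getD k 0 = (p.count k : Int)) → (∀ k, p.count k ≤ 2) →
    (pvAltLoop d l = true ↔ ∃ k, 3 ≤ (p ++ l.map Prod.snd).count k) := by
  intro l
  induction l with
  | nil =>
    intro p d hd hle
    rw [show pvAltLoop d [] = false from rfl]
    simp only [Bool.false_eq_true, false_iff, List.map_nil, List.append_nil]
    rintro ⟨k, hk⟩
    have := hle k
    omega
  | cons card rest ih =>
    intro p d hd hle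
    rw [show pvAltLoop d (card :: rest)
        = (if 3 ≤ d.getD card.2 0 + 1 then true
           else pvAltLoop (d.insert card.2 (d.getD card.2 0 + 1)) rest) from rfl]
    by_cases h3 : (3 : Int) ≤ d.getD card.2 0 + 1
    · rw [if_pos h3]
      have h2 : 2 ≤ p.count card.2 := by rw [hd card.2] at h3; omega
      simp only [true_iff]
      refine ⟨card.2, ?_⟩
      rw [List.map_cons, List.count_append, pv_count_cons, if_pos rfl]
      omega
    · rw [if_neg h3]
      have hc1 : p.count card.2 ≤ 1 := by rw [hd card.2] at h3; omega
      have hd' : ∀ k, (d.insert card.2 (d.getD card.2 0 + 1)).getD k 0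
          = ((p ++ [card.2]).count k : Int) := by
        intro k
        rw [PySem.Dict.getD_insert, List.count_append, pv_count_cons, List.count_nil]
        by_cases hk : k = card.2
        · rw [if_pos hk, if_pos hk.symm, hk, hd card.2]
          push_cast; ring
        · rw [if_neg hk, if_neg (fun h => hk h.symm), hd k]
          push_cast; ring
      have hle' : ∀ k, (p ++ [card.2]).count k ≤ 2 := by
        intro k
        rw [List.count_append, pv_count_cons]
        by_cases hk : card.2 = k
        · rw [if_pos hk, ← hk]; simp; omega
        · rw [if_neg hk]; have := hle k; simp; omega
      rw [ih (p ++ [card.2]) _ hd' hle']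
      have hl : p ++ (card :: rest).map Prod.snd = (p ++ [card.2]) ++ rest.map Prod.snd := by
        simp
      rw [hl]

-- ===== VERDICT (by name: the statement is the Claim_ definition above) =====
theorem CheckThreeOfaKind_spec : Claim_equal_CheckThreeOfaKind := by
  intro hand _
  unfold Spec_CheckThreeOfaKind CheckThreeOfaKind_alt
  rw [Bool.eq_iff_iff, pv_A_iff,
    pv_altLoop_iff hand [] PySem.Dict.empty (by intro k; simp) (by intro k; simp)]
  simp
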